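-- pv_equiv track=rewrite | github.com/Dawiderter/Max-Length-Cycles | tests/algorithm_test.py | check_if_permutation
-- ===== SOURCE A (Python) =====
-- from typing import Dict, List
--
-- def check_if_permutation(permutation : List[int]) -> bool:
--     n = len(permutation)
--     already_seen = [False for i in range(n)]
--     max_item = -1
--     for item in permutation:
--         if (not 0 <= item < n) or already_seen[item] :
--             return False
--         max_item = max(item, max_item)
--         already_seen[item] = True
--     return max_item == n-1
-- ===== SOURCE B (Python) =====
-- def check_if_permutation(permutation):
--     return sorted(permutation) == list(range(len(permutation)))
-- ===== Notes on version B (the rewrite author's own statement) =====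
-- stated objective: simpler
-- what changed: Replaces the seen-table loop with early returns and a running maximum by a single closed comparison: sorted(permutation) == list(range(n)).
import Mathlib
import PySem

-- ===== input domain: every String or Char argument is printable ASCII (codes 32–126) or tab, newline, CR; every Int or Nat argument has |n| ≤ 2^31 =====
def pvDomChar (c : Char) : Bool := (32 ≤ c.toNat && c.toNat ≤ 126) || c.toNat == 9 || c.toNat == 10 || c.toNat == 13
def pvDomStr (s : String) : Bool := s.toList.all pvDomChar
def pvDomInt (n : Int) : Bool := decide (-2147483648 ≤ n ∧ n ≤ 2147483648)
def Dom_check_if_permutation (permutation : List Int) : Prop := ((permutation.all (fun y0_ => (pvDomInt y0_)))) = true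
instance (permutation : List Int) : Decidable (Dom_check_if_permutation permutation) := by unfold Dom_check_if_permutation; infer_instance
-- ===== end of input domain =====

-- B replaces A's seen-table loop (early returns + running maximum) by the single
-- closed comparison sorted(permutation) == list(range(n)); objective: simpler.

-- ===== PORT A =====
-- loop body of A: guard, mark the seen table, update the running maximum.
-- already_seen[item] is read/written only under the guard 0 <= item < n with
-- n = len(already_seen), so the total pyGetD/pySetD forms are exact here.
def check_if_permutation_go (n : Int) (seen : List Bool) (maxItem : Int) :
    List Int → Bool
  | [] => maxItem == n - 1
  | item :: rest =>
    if !(decide (0 ≤ item) && decide (item < n)) || PySem.List.pyGetD seen item false then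
      false
    else
      check_if_permutation_go n (PySem.List.pySetD seen item true) (max item maxItem) rest

def check_if_permutation (permutation : List Int) : Bool :=
  let n := PySem.List.len permutation
  let already_seen := (PySem.List.pyRange 0 n 1).map (fun _ => false)
  check_if_permutation_go n already_seen (-1) permutation

-- ===== PORT B =====
def check_if_permutation_alt (permutation : List Int) : Bool :=
  PySem.List.sorted permutation (fun x => x) false ==
    PySem.List.pyRange 0 (PySem.List.len permutation) 1

-- ===== PRECONDITION & SPEC =====
def Spec_check_if_permutation (permutation : List Int) (out : Bool) : Prop := out = check_if_permutation_alt permutation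
instance (permutation : List Int) (out : Bool) : Decidable (Spec_check_if_permutation permutation out) := by unfold Spec_check_if_permutation; infer_instance

-- ===== CLAIM (what is proved, stated in full; the proofs are below) =====
def Claim_equal_check_if_permutation : Prop := ∀ (permutation : List Int), Dom_check_if_permutation permutation → Spec_check_if_permutation permutation (check_if_permutation permutation)

-- ===== LEMMAS AND PROOFS =====

-- reading an all-false table (with default false) gives false
lemma pyGetD_all_false (xs : List Bool) (i : Int) (h : ∀ b ∈ xs, b = false) :
    PySem.List.pyGetD xs i false = false := by
  rcases hg : PySem.List.pyGet? xs i with _ | b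
  · exact PySem.List.pyGetD_of_none xs i false hg
  · have hb := PySem.List.mem_of_pyGet?_eq_some xs hg
    have he : PySem.List.pyGetD xs i false = b := by
      simp [PySem.List.pyGetD, hg]
    rw [he]; exact h b hb

-- reading the seen table after marking one in-range entry
lemma pyGetD_set_mark (seen : List Bool) (item x : Int)
    (h0 : 0 ≤ item) (_h1 : item < (seen.length : Int))
    (h0x : 0 ≤ x) (h1x : x < (seen.length : Int)) :
    PySem.List.pyGetD (PySem.List.pySetD seen item true) x false =
      (if x = item then true else PySem.List.pyGetD seen x false) := by
  rw [PySem.List.pySetD_of_nonneg seen true h0]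
  rw [PySem.List.pyGetD_eq_getElem _ _ h0x (by simpa using h1x),
      PySem.List.pyGetD_eq_getElem _ _ h0x h1x]
  rw [List.getElem_set]
  by_cases hx : x = item
  · simp [hx]
  · have : item.toNat ≠ x.toNat := by omega
    simp [this, hx]

-- loop invariant for A's pass
lemma check_if_permutation_go_spec (rest : List Int) :
    ∀ (seen : List Bool) (m n : Int), (seen.length : Int) = n →
      (check_if_permutation_go n seen m rest = true ↔
        (∀ x ∈ rest, 0 ≤ x ∧ x < n ∧ PySem.List.pyGetD seen x false = false) ∧
          rest.Nodup ∧ rest.foldl max m = n - 1) := by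
  induction rest with
  | nil =>
    intro seen m n _
    simp [check_if_permutation_go]
  | cons item rest ih =>
    intro seen m n hlen
    by_cases hv : 0 ≤ item ∧ item < n
    · by_cases hseen : PySem.List.pyGetD seen item false = true
      · have : check_if_permutation_go n seen m (item :: rest) = false := by
          simp [check_if_permutation_go, hv.1, hv.2, hseen]
        rw [this]
        simp only [Bool.false_eq_true, false_iff]
        rintro ⟨hall, -, -⟩
        have := hall item (by simp)
        simp [hseen] at this
      · have hstep : check_if_permutation_go n seen m (item :: rest) =
            check_if_permutation_go n (PySem.List.pySetD seen item true) (max item m) rest := by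
          simp [check_if_permutation_go, hv.1, hv.2, hseen]
        rw [hstep, ih _ (max item m) n (by rw [PySem.List.length_pySetD]; exact hlen)]
        simp only [List.forall_mem_cons, List.nodup_cons, List.foldl_cons]
        have hgd : ∀ x : Int, 0 ≤ x → x < n →
            PySem.List.pyGetD (PySem.List.pySetD seen item true) x false =
              (if x = item then true else PySem.List.pyGetD seen x false) := by
          intro x hx0 hx1
          exact pyGetD_set_mark seen item x hv.1 (by omega) hx0 (by omega)
        constructor
        · rintro ⟨hall, hnd, hf⟩
          have hni : item ∉ rest := by
            intro hmem
            have := hall item hmem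
            rw [hgd item hv.1 hv.2] at this
            simp at this
          refine ⟨⟨⟨hv.1, hv.2, by simpa using hseen⟩, fun x hx => ?_⟩,
            ⟨hni, hnd⟩, by rw [max_comm m item]; exact hf⟩
          obtain ⟨hx0, hx1, hxs⟩ := hall x hx
          rw [hgd x hx0 hx1] at hxs
          have hxne : x ≠ item := by
            intro he; rw [he] at hx; exact hni hx
          rw [if_neg hxne] at hxs
          exact ⟨hx0, hx1, hxs⟩
        · rintro ⟨⟨-, hall⟩, ⟨hni, hnd⟩, hf⟩
          refine ⟨fun x hx => ?_, hnd, by rw [max_comm m item] at hf; exact hf⟩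
          obtain ⟨hx0, hx1, hxs⟩ := hall x hx
          have hxne : x ≠ item := by
            intro he; rw [he] at hx; exact hni hx
          rw [hgd x hx0 hx1, if_neg hxne]
          exact ⟨hx0, hx1, hxs⟩
    · have : check_if_permutation_go n seen m (item :: rest) = false := by
        rcases (not_and_or.mp hv) with h | h <;>
          simp [check_if_permutation_go, h]
      rw [this]
      simp only [Bool.false_eq_true, false_iff]
      rintro ⟨hall, -, -⟩
      have h2 := hall item (by simp)
      exact hv ⟨h2.1, h2.2.1⟩

lemma foldl_max_pyRange (k : Nat) :
    (PySem.List.pyRange 0 (k : Int) 1).foldl max (-1) = (k : Int) - 1 := by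
  induction k with
  | zero => simp
  | succ k ih =>
    have h : ((k : Int) + 1) = ((k + 1 : Nat) : Int) := by push_cast; ring
    rw [← h, PySem.List.pyRange_one_succ_right (by positivity)]
    simp only [List.foldl_append, ih, List.foldl_cons, List.foldl_nil]
    omega

-- A's loop conditions characterise "permutation of 0..n-1" (as a Perm with the range)
lemma perm_range_iff (l : List Int) :
    l.Perm (PySem.List.pyRange 0 (l.length : Int) 1) ↔
      ((∀ x ∈ l, 0 ≤ x ∧ x < (l.length : Int)) ∧ l.Nodup ∧
        l.foldl max (-1) = (l.length : Int) - 1) := by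
  constructor
  · intro p
    refine ⟨fun x hx => ?_, ?_, ?_⟩
    · have := (p.mem_iff).1 hx
      simpa [PySem.List.mem_pyRange_one] using this
    · exact (PySem.List.nodup_pyRange_one (a := 0) (b := (l.length : Int))).perm p.symm
    · rw [List.Perm.foldl_op_eq p, foldl_max_pyRange]
  · rintro ⟨hb, hnd, -⟩
    have hsub : l ⊆ PySem.List.pyRange 0 (l.length : Int) 1 := by
      intro x hx
      rw [PySem.List.mem_pyRange_one]
      exact (hb x hx)
    have hlen : (PySem.List.pyRange 0 (l.length : Int) 1).length ≤ l.length := by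
      rw [PySem.List.length_pyRange_one]; omega
    exact (List.subperm_of_subset hnd hsub).perm_of_length_le hlen

-- ===== VERDICT (by name: the statement is the Claim_ definition above) =====
theorem check_if_permutation_spec : Claim_equal_check_if_permutation := by
  intro l _
  unfold Spec_check_if_permutation check_if_permutation check_if_permutation_alt
  simp only [PySem.List.len_eq]
  rw [Bool.eq_iff_iff]
  have hseen0 : ∀ b ∈ (PySem.List.pyRange 0 (l.length : Int) 1).map (fun _ => false),
      b = false := by simp
  have hlen0 : ((((PySem.List.pyRange 0 (l.length : Int) 1).map
      (fun _ => false)).length : Nat) : Int) = (l.length : Int) := by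
    simp [PySem.List.length_pyRange_one]
  have hA : check_if_permutation_go (l.length : Int)
      ((PySem.List.pyRange 0 (l.length : Int) 1).map (fun _ => false)) (-1) l = true ↔
      ((∀ x ∈ l, 0 ≤ x ∧ x < (l.length : Int)) ∧ l.Nodup ∧
        l.foldl max (-1) = (l.length : Int) - 1) := by
    rw [check_if_permutation_go_spec l _ (-1) (l.length : Int) hlen0]
    constructor
    · rintro ⟨h1, h2, h3⟩
      exact ⟨fun x hx => ⟨(h1 x hx).1, (h1 x hx).2.1⟩, h2, h3⟩
    · rintro ⟨h1, h2, h3⟩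
      exact ⟨fun x hx => ⟨(h1 x hx).1, (h1 x hx).2, pyGetD_all_false _ _ hseen0⟩, h2, h3⟩
  have hB : (PySem.List.sorted l (fun x => x) false ==
      PySem.List.pyRange 0 (l.length : Int) 1) = true ↔
      l.Perm (PySem.List.pyRange 0 (l.length : Int) 1) := by
    rw [beq_iff_eq]
    constructor
    · intro h
      exact h ▸ (PySem.List.sorted_perm l (fun x => x) false).symm
    · intro h
      exact PySem.List.sorted_eq_of_perm_of_pairwise_lt l _ (fun x => x) h.symm
        (PySem.List.pairwise_lt_pyRange_one 0 (l.length : Int))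
  exact hA.trans ((perm_range_iff l).symm.trans hB.symm)
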